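-- pv_equiv track=rewrite | github.com/showjihyun/agentrag-v1 | backend/services/plugins/dependency_resolver.py | suggest_resolution
-- ===== SOURCE A (Python) =====
-- from typing import Dict, List, Set, Optional, Tuple, Any
--
-- def suggest_resolution(conflicts: List[str]) -> Dict[str, Any]:
--     """Suggest resolution strategies for conflicts"""
--     suggestions = {
--         "version_conflicts": [],
--         "missing_dependencies": [],
--         "circular_dependencies": [],
--         "recommended_actions": []
--     }
--
--     for conflict in conflicts:
--         if "Multiple versions" in conflict:
--             suggestions["version_conflicts"].append({
--                 "conflict": conflict,
--                 "suggestion": "Choose one version and update dependents to use compatible constraints"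
--             })
--         elif "Missing" in conflict:
--             suggestions["missing_dependencies"].append({
--                 "conflict": conflict,
--                 "suggestion": "Install the missing dependency or remove the dependent plugin"
--             })
--         elif "Circular" in conflict:
--             suggestions["circular_dependencies"].append({
--                 "conflict": conflict,
--                 "suggestion": "Refactor plugins to remove circular dependency"
--             })
--
--     return suggestions
-- ===== SOURCE B (Python) =====
-- # B: three independent filter passes (one comprehension per category) instead of
-- # A's single pass mutating an accumulator dict; objective: alternative decomposition.
-- def suggest_resolution(conflicts):
--     def entry(c, text):
--         return {"conflict": c, "suggestion": text}
--     return {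
--         "version_conflicts": [
--             entry(c, "Choose one version and update dependents to use compatible constraints")
--             for c in conflicts if "Multiple versions" in c
--         ],
--         "missing_dependencies": [
--             entry(c, "Install the missing dependency or remove the dependent plugin")
--             for c in conflicts
--             if "Missing" in c and "Multiple versions" not in c
--         ],
--         "circular_dependencies": [
--             entry(c, "Refactor plugins to remove circular dependency")
--             for c in conflicts
--             if "Circular" in c and "Missing" not in c and "Multiple versions" not in c
--         ],
--         "recommended_actions": [],
--     }
-- ===== Notes on version B (the rewrite author's own statement) =====
-- stated objective: alternative
-- what changed: Replaces A's single pass that mutates a shared accumulator dict through an if/elif chain by three independent filter comprehensions, one per category, each selecting its conflicts directly (with earlier keywords excluded to keep priority) and building the dict literally.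
import Mathlib
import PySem

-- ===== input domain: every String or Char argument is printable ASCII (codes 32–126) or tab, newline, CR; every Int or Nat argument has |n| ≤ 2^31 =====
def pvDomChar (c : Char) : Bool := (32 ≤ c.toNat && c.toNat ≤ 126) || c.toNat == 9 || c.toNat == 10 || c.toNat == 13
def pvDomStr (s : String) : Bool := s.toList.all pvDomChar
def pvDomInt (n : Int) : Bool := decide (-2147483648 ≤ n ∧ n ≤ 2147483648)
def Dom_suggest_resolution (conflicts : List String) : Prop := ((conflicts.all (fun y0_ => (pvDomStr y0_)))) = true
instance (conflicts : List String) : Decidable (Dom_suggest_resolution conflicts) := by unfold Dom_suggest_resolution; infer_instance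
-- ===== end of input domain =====

-- B replaces A's single accumulator-dict pass by three independent filter passes, one per category; objective: alternative decomposition.

-- ===== PORT A =====
-- the initial four-key dict literal from A
def pvInitA : PySem.Dict String (List (List (String × String))) :=
  ((((PySem.Dict.empty).insert "version_conflicts" []).insert "missing_dependencies" []).insert
    "circular_dependencies" []).insert "recommended_actions" []

-- one iteration of A's for-loop (the if/elif chain; list.append = ++ [x])
def pvStepA (d : PySem.Dict String (List (List (String × String)))) (conflict : String) :
    PySem.Dict String (List (List (String × String))) :=
  if PySem.Str.isIn "Multiple versions" conflict then
    d.modify "version_conflicts" []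
      (· ++ [[("conflict", conflict),
              ("suggestion", "Choose one version and update dependents to use compatible constraints")]])
  else if PySem.Str.isIn "Missing" conflict then
    d.modify "missing_dependencies" []
      (· ++ [[("conflict", conflict),
              ("suggestion", "Install the missing dependency or remove the dependent plugin")]])
  else if PySem.Str.isIn "Circular" conflict then
    d.modify "circular_dependencies" []
      (· ++ [[("conflict", conflict),
              ("suggestion", "Refactor plugins to remove circular dependency")]])
  else d

def suggest_resolution (conflicts : List String) : List (String × List (List (String × String))) :=
  (conflicts.foldl pvStepA pvInitA).items

-- ===== PORT B =====
-- Source B's entry(c, text) helper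
def pvEntry (c text : String) : List (String × String) :=
  [("conflict", c), ("suggestion", text)]

-- Source B: the dict is built literally from three independent filter comprehensions
def suggest_resolution_alt (conflicts : List String) : List (String × List (List (String × String))) :=
  [("version_conflicts",
      (conflicts.filter (fun c => PySem.Str.isIn "Multiple versions" c)).map
        (fun c => pvEntry c "Choose one version and update dependents to use compatible constraints")),
   ("missing_dependencies",
      (conflicts.filter (fun c =>
          PySem.Str.isIn "Missing" c && !PySem.Str.isIn "Multiple versions" c)).map
        (fun c => pvEntry c "Install the missing dependency or remove the dependent plugin")),
   ("circular_dependencies",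
      (conflicts.filter (fun c =>
          PySem.Str.isIn "Circular" c && !PySem.Str.isIn "Missing" c
            && !PySem.Str.isIn "Multiple versions" c)).map
        (fun c => pvEntry c "Refactor plugins to remove circular dependency")),
   ("recommended_actions", [])]

-- ===== PRECONDITION & SPEC =====
def Spec_suggest_resolution (conflicts : List String) (out : List (String × List (List (String × String)))) : Prop := out = suggest_resolution_alt conflicts
instance (conflicts : List String) (out : List (String × List (List (String × String)))) : Decidable (Spec_suggest_resolution conflicts out) := by unfold Spec_suggest_resolution; infer_instance

-- ===== CLAIM (what is proved, stated in full; the proofs are below) =====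
def Claim_equal_suggest_resolution : Prop := ∀ (conflicts : List String), Dom_suggest_resolution conflicts → Spec_suggest_resolution conflicts (suggest_resolution conflicts)

-- ===== LEMMAS AND PROOFS =====

-- the state of A's loop, as a literal dict with the three accumulated lists
def pvState (v m c : List (List (String × String))) : PySem.Dict String (List (List (String × String))) :=
  PySem.Dict.mk [("version_conflicts", v), ("missing_dependencies", m),
                 ("circular_dependencies", c), ("recommended_actions", [])]

theorem pvInitA_eq : pvInitA = pvState [] [] [] := by decide

-- loop invariant: folding A's step over any state produces B's three filtered lists appended
theorem pvFold_state (cs : List String) (v m c : List (List (String × String))) :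
    cs.foldl pvStepA (pvState v m c) =
      pvState
        (v ++ (cs.filter (fun x => PySem.Str.isIn "Multiple versions" x)).map
            (fun x => pvEntry x "Choose one version and update dependents to use compatible constraints"))
        (m ++ (cs.filter (fun x =>
              PySem.Str.isIn "Missing" x && !PySem.Str.isIn "Multiple versions" x)).map
            (fun x => pvEntry x "Install the missing dependency or remove the dependent plugin"))
        (c ++ (cs.filter (fun x =>
              PySem.Str.isIn "Circular" x && !PySem.Str.isIn "Missing" x
                && !PySem.Str.isIn "Multiple versions" x)).map
            (fun x => pvEntry x "Refactor plugins to remove circular dependency")) := by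
  induction cs generalizing v m c with
  | nil => simp [pvState]
  | cons hd tl ih =>
    simp only [List.foldl_cons, List.filter_cons]
    have hstep : ∀ v' m' c', pvStepA (pvState v' m' c') hd =
        if PySem.Str.isIn "Multiple versions" hd then
          pvState (v' ++ [pvEntry hd "Choose one version and update dependents to use compatible constraints"]) m' c'
        else if PySem.Str.isIn "Missing" hd then
          pvState v' (m' ++ [pvEntry hd "Install the missing dependency or remove the dependent plugin"]) c'
        else if PySem.Str.isIn "Circular" hd then
          pvState v' m' (c' ++ [pvEntry hd "Refactor plugins to remove circular dependency"])
        else pvState v' m' c' := by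
      intro v' m' c'
      unfold pvStepA pvState pvEntry
      split_ifs <;> rfl
    rw [hstep]
    by_cases h1 : PySem.Str.isIn "Multiple versions" hd <;>
      by_cases h2 : PySem.Str.isIn "Missing" hd <;>
        by_cases h3 : PySem.Str.isIn "Circular" hd <;>
          simp only [PySem.Str.isIn_eq, String.reduceToList] at h1 h2 h3 <;>
            simp [h1, h2, h3, ih]

-- ===== VERDICT (by name: the statement is the Claim_ definition above) =====
theorem suggest_resolution_spec : Claim_equal_suggest_resolution := by
  intro conflicts _
  unfold Spec_suggest_resolution suggest_resolution suggest_resolution_alt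
  rw [pvInitA_eq, pvFold_state]
  rfl
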